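-- pv_equiv track=rewrite | github.com/LSAI2023/Atlas | backend/app/core/chunker.py | _ensure_overlap
-- ===== SOURCE A (Python) =====
-- from typing import Optional, List, Dict
--
-- def _ensure_overlap(chunks: List[str], overlap: int) -> List[str]:
--     """
--     LangChain 在某些分隔边界下可能出现可见重叠不明显的情况。
--     若相邻分片没有公共前后缀，则补上前一片尾部 overlap 字符，确保重叠存在。
--     """
--     if overlap <= 0 or len(chunks) <= 1:
--         return chunks
--
--     ensured = [chunks[0]]
--     for i in range(1, len(chunks)):
--         prev = ensured[-1]
--         curr = chunks[i]
--         prev_tail = prev[-overlap:].strip()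
--         if not prev_tail:
--             ensured.append(curr)
--             continue
--
--         max_check = min(len(prev_tail), len(curr), overlap)
--         has_overlap = False
--         for n in range(max_check, 0, -1):
--             if prev_tail[-n:] == curr[:n]:
--                 has_overlap = True
--                 break
--
--         if has_overlap:
--             ensured.append(curr)
--         else:
--             ensured.append(f"{prev_tail}\n{curr}".strip())
--     return ensured
-- ===== SOURCE B (Python) =====
-- from typing import List
--
-- def _ensure_overlap(chunks: List[str], overlap: int) -> List[str]:
--     # A KMP failure-function pass over curr[:m] + '\x00' + tail[-m:] decides whether
--     # any suffix of the previous tail equals a prefix of the current chunk.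
--     if overlap <= 0 or len(chunks) <= 1:
--         return chunks
--     ensured = [chunks[0]]
--     for curr in chunks[1:]:
--         prev_tail = ensured[-1][-overlap:].strip()
--         if prev_tail:
--             m = min(len(prev_tail), len(curr))
--             s = curr[:m] + "\x00" + prev_tail[-m:]
--             pi = [0]
--             k = 0
--             for i in range(1, len(s)):
--                 while k > 0 and s[i] != s[k]:
--                     k = pi[k - 1]
--                 if s[i] == s[k]:
--                     k += 1
--                 pi.append(k)
--             if k == 0:
--                 curr = (prev_tail + "\n" + curr).strip()
--         ensured.append(curr)
--     return ensured
-- ===== Notes on version B (the rewrite author's own statement) =====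
-- stated objective: alternative
-- what changed: A decides whether the previous tail overlaps the next chunk by trying every candidate length n descending and comparing two fresh slices per n; B instead builds curr[:m] + '\x00' + tail[-m:] once and runs a single KMP failure-function pass over it, reading the overlap decision off the final border length (fewer character comparisons asymptotically, but pure-Python bookkeeping, so not measurably faster than A's C-level slice comparisons).
import Mathlib
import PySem

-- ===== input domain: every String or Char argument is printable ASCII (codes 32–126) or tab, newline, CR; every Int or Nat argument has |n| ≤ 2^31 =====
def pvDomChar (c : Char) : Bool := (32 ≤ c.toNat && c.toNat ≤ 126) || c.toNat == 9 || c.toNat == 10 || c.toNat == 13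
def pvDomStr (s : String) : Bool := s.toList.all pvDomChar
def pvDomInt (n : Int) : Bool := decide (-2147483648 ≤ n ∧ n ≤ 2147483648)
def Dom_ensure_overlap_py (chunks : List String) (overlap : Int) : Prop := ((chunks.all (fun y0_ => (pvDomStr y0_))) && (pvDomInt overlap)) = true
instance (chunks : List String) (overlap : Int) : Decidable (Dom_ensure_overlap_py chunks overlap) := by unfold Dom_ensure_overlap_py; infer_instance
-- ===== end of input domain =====

-- B replaces A's descending scan over all candidate overlap lengths (each compared by string
-- slicing) with a single KMP failure-function pass over curr[:m] + '\x00' + prev_tail[-m:].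

-- ===== PORT A =====
-- loop body of A's 'for i in range(1, len(chunks))' (helper of the A port); the inner search
-- loop with its break is ported as .any over the countdown range
def aStep (overlap : Int) (ensured : List String) (curr : String) : List String :=
  let prev := PySem.List.pyGetD ensured (-1) ""
  let prev_tail := PySem.Str.strip (PySem.Str.slice prev (some (-overlap)) none)
  if prev_tail = "" then ensured ++ [curr]
  else
    let max_check : Int := min (min (PySem.Str.len prev_tail) (PySem.Str.len curr)) overlap
    let has_overlap :=
      (PySem.List.pyRange max_check 0 (-1)).any
        (fun n => PySem.Str.slice prev_tail (some (-n)) none == PySem.Str.slice curr none (some n))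
    if has_overlap then ensured ++ [curr]
    else ensured ++ [PySem.Str.strip (prev_tail ++ "\n" ++ curr)]


def ensure_overlap_py (chunks : List String) (overlap : Int) : List String :=
  if overlap ≤ 0 ∨ PySem.List.len chunks ≤ 1 then chunks
  else
    (PySem.List.pyRange 1 (PySem.List.len chunks) 1).foldl
      (fun ensured i => aStep overlap ensured (PySem.List.pyGetD chunks i ""))
      [PySem.List.pyGetD chunks 0 ""]

-- ===== PORT B =====
-- 'while k > 0 and s[i] != s[k]: k = pi[k-1]' of Source B; fuel = the entering k, which strictly
-- bounds the number of iterations (each iteration strictly decreases k, see kmpWhile_spec)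
def kmpWhile (s : List Char) (pi : List Nat) (c : Char) : Nat → Nat → Nat
  | 0, k => k
  | fuel + 1, k => if 0 < k ∧ c ≠ s.getD k ' ' then kmpWhile s pi c fuel (pi.getD (k - 1) 0) else k


def kmpMain (s : List Char) (i : Nat) (pi : List Nat) (k : Nat) : Nat :=
  if i < s.length then
    let k1 := kmpWhile s pi (s.getD i ' ') k k
    let k2 := if s.getD i ' ' = s.getD k1 ' ' then k1 + 1 else k1
    kmpMain s (i + 1) (pi ++ [k2]) k2
  else k
  termination_by s.length - i


-- loop body of B's 'for curr in chunks[1:]' (helper of the B port); the Python string s is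
-- ported as its list of code points (exact: Python str equality/indexing is by code point)
def bStep (overlap : Int) (ensured : List String) (curr : String) : List String :=
  let prev_tail := PySem.Str.strip (PySem.Str.slice (PySem.List.pyGetD ensured (-1) "") (some (-overlap)) none)
  let curr2 :=
    if prev_tail = "" then curr
    else
      let m : Int := min (PySem.Str.len prev_tail) (PySem.Str.len curr)
      let s := (PySem.Str.slice curr none (some m)).toList
                 ++ '\x00' :: (PySem.Str.slice prev_tail (some (-m)) none).toList
      if kmpMain s 1 [0] 0 = 0 then PySem.Str.strip (prev_tail ++ "\n" ++ curr) else curr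
  ensured ++ [curr2]



def ensure_overlap_py_alt (chunks : List String) (overlap : Int) : List String :=
  if overlap ≤ 0 ∨ PySem.List.len chunks ≤ 1 then chunks
  else
    (PySem.List.slice chunks (some 1) none).foldl (bStep overlap) [PySem.List.pyGetD chunks 0 ""]

-- ===== PRECONDITION & SPEC =====
-- A is total on Dom (no exceptions are reachable), so no Pre_ is defined.
def Spec_ensure_overlap_py (chunks : List String) (overlap : Int) (out : List String) : Prop := out = ensure_overlap_py_alt chunks overlap
instance (chunks : List String) (overlap : Int) (out : List String) : Decidable (Spec_ensure_overlap_py chunks overlap out) := by unfold Spec_ensure_overlap_py; infer_instance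

-- ===== CLAIM (what is proved, stated in full; the proofs are below) =====
def Claim_equal_ensure_overlap_py : Prop := ∀ (chunks : List String) (overlap : Int), Dom_ensure_overlap_py chunks overlap → Spec_ensure_overlap_py chunks overlap (ensure_overlap_py chunks overlap)

-- ===== LEMMAS AND PROOFS =====

-- n is a proper border length of s.take i : s.take n is both a prefix and a suffix of s.take i
abbrev Brd (s : List Char) (i n : Nat) : Prop := n < i ∧ s.take n <:+ s.take i

-- the longest proper border length of s.take i (the KMP failure function's value at i)
def FB (s : List Char) (i : Nat) : Nat := Nat.findGreatest (fun n => Brd s i n) i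

theorem Brd_zero (s : List Char) (i : Nat) (h : 0 < i) : Brd s i 0 := ⟨h, by simp⟩

theorem Brd_trans {s : List Char} {i k p : Nat} (h1 : Brd s i k) (h2 : Brd s k p) : Brd s i p :=
  ⟨h2.1.trans h1.1, h2.2.trans h1.2⟩

theorem Brd_down {s : List Char} {i n k : Nat}
    (h1 : Brd s i n) (h2 : Brd s i k) (hlt : n < k) : Brd s k n := by
  refine ⟨hlt, ?_⟩
  have hp := List.prefix_of_prefix_length_le
    (List.reverse_prefix.2 h1.2) (List.reverse_prefix.2 h2.2) ?_
  · exact List.reverse_prefix.1 hp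
  · simp; omega

theorem Brd_ext {s : List Char} {i n : Nat} (hi : i < s.length) :
    Brd s (i + 1) (n + 1) ↔ Brd s i n ∧ s.getD n ' ' = s.getD i ' ' := by
  constructor
  · rintro ⟨hlt, hsuf⟩
    have hni : n < i := by omega
    have hnl : n < s.length := by omega
    rw [List.take_add_one, List.take_add_one] at hsuf
    rw [List.getElem?_eq_getElem hnl, List.getElem?_eq_getElem hi] at hsuf
    simp only [Option.toList_some] at hsuf
    -- (take n ++ [s[n]]) <:+ (take i ++ [s[i]])
    obtain ⟨u, hu⟩ := hsuf
    rw [← List.append_assoc, ← List.concat_eq_append, ← List.concat_eq_append] at hu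
    rw [List.concat_inj] at hu
    refine ⟨⟨hni, ⟨u, hu.1⟩⟩, ?_⟩
    simp [List.getD_eq_getElem?_getD, List.getElem?_eq_getElem hnl, List.getElem?_eq_getElem hi, hu.2]
  · rintro ⟨⟨hni, hsuf⟩, heq⟩
    have hnl : n < s.length := by omega
    refine ⟨by omega, ?_⟩
    rw [List.take_add_one, List.take_add_one]
    rw [List.getElem?_eq_getElem hnl, List.getElem?_eq_getElem hi]
    obtain ⟨u, hu⟩ := hsuf
    refine ⟨u, ?_⟩
    have : s[n] = s[i] := by
      simpa [List.getD_eq_getElem?_getD, List.getElem?_eq_getElem hnl, List.getElem?_eq_getElem hi] using heq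
    simp [this, ← List.append_assoc, hu]

theorem FB_isBrd (s : List Char) (i : Nat) (h : 1 ≤ i) : Brd s i (FB s i) :=
  Nat.findGreatest_spec (m := 0) (Nat.zero_le i) (Brd_zero s i h)

theorem FB_lt (s : List Char) (i : Nat) (h : 1 ≤ i) : FB s i < i := (FB_isBrd s i h).1

theorem le_FB {s : List Char} {i n : Nat} (h : Brd s i n) : n ≤ FB s i :=
  Nat.le_findGreatest (Nat.le_of_lt h.1) h

theorem kmpWhile_spec (s : List Char) (i : Nat) (pi : List Nat) (c : Char)
    (hpi : ∀ j, j < i → pi.getD j 0 = FB s (j + 1)) :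
    ∀ k fuel, k ≤ fuel → Brd s i k →
      (Brd s i (kmpWhile s pi c fuel k) ∧ kmpWhile s pi c fuel k ≤ k ∧
       (kmpWhile s pi c fuel k = 0 ∨ c = s.getD (kmpWhile s pi c fuel k) ' ') ∧
       (∀ n, Brd s i n → n ≤ k → c = s.getD n ' ' → n ≤ kmpWhile s pi c fuel k)) := by
  intro k
  induction k using Nat.strong_induction_on with
  | _ k IH =>
    intro fuel hfuel hb
    match fuel with
    | 0 =>
      have hk0 : k = 0 := by omega
      subst hk0
      simp only [kmpWhile]
      exact ⟨hb, le_rfl, Or.inl (by simp), fun n _ hn _ => hn⟩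
    | fuel + 1 =>
      simp only [kmpWhile]
      by_cases hcond : 0 < k ∧ c ≠ s.getD k ' '
      · simp only [if_pos hcond]
        have hk1 : 1 ≤ k := hcond.1
        have hbk : Brd s k (FB s k) := FB_isBrd s k hk1
        have hbik : Brd s i (FB s k) := Brd_trans hb hbk
        have hFBlt : FB s k < k := FB_lt s k hk1
        have hgetd : pi.getD (k - 1) 0 = FB s k := by
          have := hpi (k - 1) (by have := hb.1; omega)
          rwa [Nat.sub_add_cancel hk1] at this
        rw [hgetd]
        have hfuel2 : FB s k ≤ fuel := le_trans (Nat.le_pred_of_lt hFBlt) (Nat.sub_le_iff_le_add.2 hfuel)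
        obtain ⟨r1, r2, r3, r4⟩ := IH (FB s k) hFBlt fuel hfuel2 hbik
        refine ⟨r1, by omega, r3, ?_⟩
        intro n hbn hnk hc
        have hne : n ≠ k := by
          rintro rfl; exact hcond.2 hc
        have : Brd s k n := Brd_down hbn hb (by have := hbn.1; omega)
        exact r4 n hbn (le_FB this) hc
      · simp only [if_neg hcond]
        push Not at hcond
        refine ⟨hb, le_rfl, ?_, fun n _ hn _ => hn⟩
        by_cases hk : k = 0
        · exact Or.inl hk
        · exact Or.inr (hcond (by omega))

theorem FB_succ_eq (s : List Char) (i : Nat) (pi : List Nat) (fuel : Nat)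
    (hi : 1 ≤ i) (hil : i < s.length) (hfl : FB s i ≤ fuel)
    (hpi : ∀ j, j < i → pi.getD j 0 = FB s (j + 1)) :
    FB s (i + 1) = (if s.getD i ' ' = s.getD (kmpWhile s pi (s.getD i ' ') fuel (FB s i)) ' '
      then kmpWhile s pi (s.getD i ' ') fuel (FB s i) + 1
      else kmpWhile s pi (s.getD i ' ') fuel (FB s i)) := by
  have hbF : Brd s i (FB s i) := FB_isBrd s i hi
  obtain ⟨r1, r2, r3, r4⟩ := kmpWhile_spec s i pi (s.getD i ' ') hpi (FB s i) fuel hfl hbF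
  set c := s.getD i ' ' with hc
  set r := kmpWhile s pi c fuel (FB s i) with hr
  have hBrd_succ : Brd s (i + 1) (FB s (i + 1)) := FB_isBrd s (i + 1) (by omega)
  by_cases hcr : c = s.getD r ' '
  · simp only [if_pos hcr]
    refine le_antisymm ?_ ?_
    · rcases Nat.eq_zero_or_pos (FB s (i + 1)) with h0 | hpos
      · omega
      · obtain ⟨n, hn⟩ : ∃ n, FB s (i + 1) = n + 1 := ⟨FB s (i+1) - 1, by omega⟩
        rw [hn] at hBrd_succ ⊢
        have := (Brd_ext hil).1 hBrd_succ
        have hn_le : n ≤ FB s i := le_FB this.1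
        have : n ≤ r := r4 n this.1 hn_le this.2.symm
        omega
    · apply le_FB
      exact (Brd_ext hil).2 ⟨r1, hcr.symm⟩
  · simp only [if_neg hcr]
    have hr0 : r = 0 := by
      rcases r3 with h | h
      · exact h
      · exact absurd h hcr
    rw [hr0]
    rcases Nat.eq_zero_or_pos (FB s (i + 1)) with h0 | hpos
    · omega
    · exfalso
      obtain ⟨n, hn⟩ : ∃ n, FB s (i + 1) = n + 1 := ⟨FB s (i+1) - 1, by omega⟩
      rw [hn] at hBrd_succ
      have := (Brd_ext hil).1 hBrd_succ
      have hn_le : n ≤ FB s i := le_FB this.1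
      have hnr : n ≤ r := r4 n this.1 hn_le this.2.symm
      have hn0 : n = 0 := by omega
      subst hn0
      exact hcr (by rw [hr0]; exact this.2.symm)

theorem kmpMain_spec (s : List Char) :
    ∀ n i pi, s.length - i = n → 1 ≤ i → i ≤ s.length → pi.length = i →
      (∀ j, j < i → pi.getD j 0 = FB s (j + 1)) →
      kmpMain s i pi (FB s i) = FB s s.length := by
  intro n
  induction n with
  | zero =>
    intro i pi hn hi hil hlen hpi
    have : i = s.length := by omega
    rw [kmpMain, if_neg (by omega), this]
  | succ n IH =>
    intro i pi hn hi hil hlen hpi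
    have hlt : i < s.length := by omega
    rw [kmpMain, if_pos hlt]
    dsimp only
    have hstep := FB_succ_eq s i pi (FB s i) hi hlt le_rfl hpi
    rw [← hstep]
    have hpi2 : ∀ j, j < i + 1 → (pi ++ [FB s (i+1)]).getD j 0 = FB s (j + 1) := by
      intro j hj
      rcases Nat.lt_or_ge j i with h | h
      · rw [List.getD_append _ _ _ _ (by omega)]
        exact hpi j h
      · have hj' : j = i := by omega
        subst hj'
        rw [List.getD_eq_getElem _ _ (by simp [hlen])]
        rw [List.getElem_append_right (by omega)]
        simp [hlen]
    exact IH (i+1) (pi ++ [FB s (i+1)]) (by omega) (by omega) (by omega) (by simp [hlen]) hpi2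

theorem sep_core (A B : List Char) (m : Nat) (hAl : A.length = m) (hBl : B.length = m)
    (hBn : ∀ b ∈ B, b ≠ '\x00') (n : Nat) (hn : 1 ≤ n) :
    (Brd (A ++ '\x00' :: B) (2 * m + 1) n ↔
      n ≤ m ∧ (A ++ '\x00' :: B).take n = (A ++ '\x00' :: B).drop (2 * m + 1 - n)) := by
  set s' := A ++ '\x00' :: B with hs'
  have hsl : s'.length = 2 * m + 1 := by simp [hs', hAl, hBl]; omega
  constructor
  · rintro ⟨hlt, hsuf⟩
    have hts : s'.take (2 * m + 1) = s' := by rw [← hsl, List.take_length]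
    rw [hts] at hsuf
    have hlen_take : (s'.take n).length = n := by simp [hsl]; omega
    have heq : s'.take n = s'.drop (2 * m + 1 - n) := by
      have := List.suffix_iff_eq_drop.1 hsuf
      rwa [hlen_take, hsl] at this
    have hnm : n ≤ m := by
      by_contra hgt
      push Not at hgt
      have e0 := congrArg (fun l : List Char => l[m]?) heq
      simp only [List.getElem?_take, if_pos hgt, List.getElem?_drop] at e0
      have hL : s'[m]? = some '\x00' := by
        rw [hs', List.getElem?_append_right (by omega)]
        have h0 : m - A.length = 0 := by omega
        rw [h0]
        rfl
      have hR : ∃ b ∈ B, s'[2 * m + 1 - n + m]? = some b := by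
        have hband : 2 * m + 1 - n + m - A.length = (2 * m - n) + 1 := by omega
        rw [hs', List.getElem?_append_right (by omega), hband, List.getElem?_cons_succ]
        have hblt : 2 * m - n < B.length := by omega
        exact ⟨B[2 * m - n], List.getElem_mem _, (List.getElem?_eq_getElem hblt)⟩
      obtain ⟨b, hbB, hbeq⟩ := hR
      rw [hL, hbeq] at e0
      have hb0 : b = '\x00' := by injection e0.symm
      exact hBn b hbB hb0
    exact ⟨hnm, heq⟩
  · rintro ⟨hnm, heq⟩
    refine ⟨by omega, ?_⟩
    have hts : s'.take (2 * m + 1) = s' := by rw [← hsl, List.take_length]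
    rw [hts, heq]
    exact List.drop_suffix _ _

theorem sep_take (A B : List Char) (c : List Char) (m : Nat) (hAc : A = c.take m)
    (hAl : A.length = m) (x : Nat) (hx : x ≤ m) :
    (A ++ '\x00' :: B).take x = c.take x := by
  rw [List.take_append_of_le_length (by omega), hAc, List.take_take]
  congr 1
  omega

theorem sep_drop (A B : List Char) (t : List Char) (m : Nat) (hBt : B = t.drop (t.length - m))
    (hAl : A.length = m) (hBl : B.length = m) (hmt : m ≤ t.length) (x : Nat) (hx : x ≤ m) :
    (A ++ '\x00' :: B).drop (2 * m + 1 - x) = t.drop (t.length - x) := by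
  have h1 : 2 * m + 1 - x = A.length + ((m - x) + 1) := by omega
  rw [h1, List.drop_append, List.drop_eq_nil_of_le (by omega), Nat.add_sub_cancel_left,
    List.drop_succ_cons, List.nil_append, hBt, List.drop_drop]
  congr 1
  omega

theorem sep_bridge (c t : List Char) (m : Nat)
    (hm : m = min c.length t.length)
    (ht : '\x00' ∉ t) (n : Nat) (hn : 1 ≤ n) :
    (Brd (c.take m ++ '\x00' :: t.drop (t.length - m)) (2 * m + 1) n ↔
      n ≤ m ∧ c.take n = t.drop (t.length - n)) := by
  have hAl : (c.take m).length = m := by simp; omega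
  have hBl : (t.drop (t.length - m)).length = m := by simp; omega
  have hBn : ∀ b ∈ t.drop (t.length - m), b ≠ '\x00' := by
    intro b hb hb0
    exact ht (hb0 ▸ List.mem_of_mem_drop hb)
  rw [sep_core _ _ m hAl hBl hBn n hn]
  constructor
  · rintro ⟨hnm, heq⟩
    rw [sep_take _ _ c m rfl hAl n hnm, sep_drop _ _ t m rfl hAl hBl (by omega) n hnm] at heq
    exact ⟨hnm, heq⟩
  · rintro ⟨hnm, heq⟩
    refine ⟨hnm, ?_⟩
    rw [sep_take _ _ c m rfl hAl n hnm, sep_drop _ _ t m rfl hAl hBl (by omega) n hnm]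
    exact heq

theorem kmp_run (s : List Char) (h : 1 ≤ s.length) : kmpMain s 1 [0] 0 = FB s s.length := by
  have h0 : FB s 1 = 0 := by
    unfold FB
    rw [Nat.findGreatest_succ]
    simp [Brd]
  have hpi : ∀ j, j < 1 → [0].getD j 0 = FB s (j + 1) := by
    intro j hj
    interval_cases j
    simp [h0]
  have := kmpMain_spec s (s.length - 1) 1 [0] (by omega) le_rfl h (by simp) hpi
  rwa [h0] at this

theorem kmp_exists (s : List Char) (h : 1 ≤ s.length) :
    (kmpMain s 1 [0] 0 ≠ 0 ↔ ∃ n, 1 ≤ n ∧ Brd s s.length n) := by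
  rw [kmp_run s h]
  constructor
  · intro hne
    exact ⟨FB s s.length, Nat.one_le_iff_ne_zero.2 hne, FB_isBrd s s.length h⟩
  · rintro ⟨n, hn1, hb⟩
    have := le_FB hb
    omega

-- a string starting with NUL over a NUL-free rest has no nonzero border

theorem no_border_cons_nul (t : List Char) (ht : '\x00' ∉ t) (n : Nat) (hn : 1 ≤ n) :
    ¬ Brd ('\x00' :: t) (t.length + 1) n := by
  rintro ⟨hlt, hsuf⟩
  set s' := '\x00' :: t with hs'
  have hsl : s'.length = t.length + 1 := by simp [hs']
  have hts : s'.take (t.length + 1) = s' := by rw [← hsl, List.take_length]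
  rw [hts] at hsuf
  have hlen_take : (s'.take n).length = n := by simp [hsl]; omega
  have heq : s'.take n = s'.drop (t.length + 1 - n) := by
    have := List.suffix_iff_eq_drop.1 hsuf
    rwa [hlen_take, hsl] at this
  have e0 := congrArg (fun l : List Char => l[0]?) heq
  simp only [List.getElem?_take, if_pos (by omega : 0 < n), List.getElem?_drop, Nat.add_zero] at e0
  have hL : s'[0]? = some '\x00' := rfl
  have hR : ∃ b ∈ t, s'[t.length + 1 - n]? = some b := by
    have hband : t.length + 1 - n = (t.length - n) + 1 := by omega
    rw [hs', hband, List.getElem?_cons_succ]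
    have hblt : t.length - n < t.length := by omega
    exact ⟨t[t.length - n], List.getElem_mem _, List.getElem?_eq_getElem hblt⟩
  obtain ⟨b, hbt, hbeq⟩ := hR
  rw [hL, hbeq] at e0
  have hb0 : b = '\x00' := by injection e0.symm
  exact ht (hb0 ▸ hbt)

theorem mem_strip {x : Char} {l : List Char} (h : x ∈ PySem.Chars.strip l) : x ∈ l := by
  unfold PySem.Chars.strip PySem.Chars.rstrip PySem.Chars.lstrip at h
  have h1 := (List.dropWhile_sublist _).subset (List.mem_reverse.1 h)
  have h2 := List.mem_reverse.1 h1
  exact (List.dropWhile_sublist _).subset h2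

theorem strip_len_le (l : List Char) : (PySem.Chars.strip l).length ≤ l.length := by
  unfold PySem.Chars.strip PySem.Chars.rstrip PySem.Chars.lstrip
  calc (List.dropWhile _ (List.dropWhile _ l).reverse).reverse.length
      = (List.dropWhile _ (List.dropWhile _ l).reverse).length := List.length_reverse
    _ ≤ (List.dropWhile _ l).reverse.length := List.length_dropWhile_le _ _
    _ = (List.dropWhile _ l).length := List.length_reverse
    _ ≤ l.length := List.length_dropWhile_le _ _

theorem str_ne_empty_iff (s : String) : s ≠ "" ↔ s.toList ≠ [] := by
  constructor
  · intro h hl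
    exact h (String.toList_inj.1 (by simpa using hl))
  · intro h hs
    exact h (by simp [hs])

theorem step_eq (overlap : Int) (hov : 1 ≤ overlap) (ensured : List String) (curr : String)
    (hne : ensured ≠ []) (hens : ∀ x ∈ ensured, '\x00' ∉ x.toList)
    (_hcur : '\x00' ∉ curr.toList) :
    aStep overlap ensured curr = bStep overlap ensured curr := by
  unfold aStep bStep
  simp only []
  set pt := PySem.Str.strip (PySem.Str.slice (PySem.List.pyGetD ensured (-1) "") (some (-overlap)) none) with hpt
  by_cases h0 : pt = ""
  · simp [h0]
  · simp only [if_neg h0]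
    have hptl : pt.toList = PySem.Chars.strip (PySem.List.slice (PySem.List.pyGetD ensured (-1) "").toList (some (-overlap)) none) := by
      rw [hpt, PySem.Str.toList_strip, PySem.Str.toList_slice, PySem.Chars.slice_eq_listSlice]
    have hprevmem : PySem.List.pyGetD ensured (-1) "" ∈ ensured := by
      rw [PySem.List.pyGetD_neg_one ensured "" hne]
      exact List.getLast_mem hne
    have hptnul : '\x00' ∉ pt.toList := by
      intro hmem
      rw [hptl] at hmem
      exact hens _ hprevmem (PySem.List.mem_of_mem_slice _ _ _ (mem_strip hmem))
    have htl1 : 1 ≤ pt.toList.length := by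
      rcases (str_ne_empty_iff pt).1 h0 with h
      cases h' : pt.toList with
      | nil => exact absurd h' h
      | cons a l => simp
    have hub : (pt.toList.length : Int) ≤ overlap := by
      have h1 : pt.toList.length ≤ (PySem.List.slice (PySem.List.pyGetD ensured (-1) "").toList (some (-overlap)) none).length := by
        rw [hptl]; exact strip_len_le _
      have hovn : overlap = ((overlap.toNat : Nat) : Int) := by omega
      rw [hovn] at h1
      rw [PySem.List.slice_from_neg_natCast _ _ (by omega)] at h1
      simp only [List.length_drop] at h1
      omega
    have hmB : min (PySem.Str.len pt) (PySem.Str.len curr)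
        = ((min pt.toList.length curr.toList.length : Nat) : Int) := by
      rw [PySem.Str.len_eq, PySem.Str.len_eq]
      omega
    have hmc : min (min (PySem.Str.len pt) (PySem.Str.len curr)) overlap
        = ((min pt.toList.length curr.toList.length : Nat) : Int) := by
      rw [hmB]
      apply min_eq_left
      calc ((min pt.toList.length curr.toList.length : Nat) : Int)
          ≤ (pt.toList.length : Int) := by exact_mod_cast Nat.min_le_left _ _
        _ ≤ overlap := hub
    rw [hmc, hmB]
    clear hmc hmB
    -- A's inner loop finds an overlap iff some admissible length matches
    have hany : ((PySem.List.pyRange ((min pt.toList.length curr.toList.length : Nat) : Int) 0 (-1)).any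
        (fun n => PySem.Str.slice pt (some (-n)) none == PySem.Str.slice curr none (some n)) = true)
        ↔ ∃ nn : Nat, 1 ≤ nn ∧ nn ≤ min pt.toList.length curr.toList.length ∧
            pt.toList.drop (pt.toList.length - nn) = curr.toList.take nn := by
      rw [List.any_eq_true]
      constructor
      · rintro ⟨n, hmem, hp⟩
        rw [PySem.List.mem_pyRange_neg_one] at hmem
        rw [beq_iff_eq, ← String.toList_inj] at hp
        rw [PySem.Str.toList_slice, PySem.Str.toList_slice, PySem.Chars.slice_eq_listSlice, PySem.Chars.slice_eq_listSlice] at hp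
        refine ⟨n.toNat, by omega, by omega, ?_⟩
        have hn1 : n = ((n.toNat : Nat) : Int) := by omega
        rw [hn1, PySem.List.slice_from_neg_natCast _ _ (by omega), PySem.List.slice_to _ (by omega)] at hp
        rw [Int.toNat_natCast] at hp
        exact hp
      · rintro ⟨nn, h1, h2, heq⟩
        refine ⟨(nn : Int), ?_, ?_⟩
        · rw [PySem.List.mem_pyRange_neg_one]
          omega
        · rw [beq_iff_eq, ← String.toList_inj]
          rw [PySem.Str.toList_slice, PySem.Str.toList_slice, PySem.Chars.slice_eq_listSlice, PySem.Chars.slice_eq_listSlice]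
          rw [PySem.List.slice_from_neg_natCast _ _ (by omega), PySem.List.slice_to _ (by omega)]
          rw [Int.toNat_natCast]
          exact heq
    -- B's failure-function run is zero iff no admissible length matches
    have hkmp : (kmpMain ((PySem.Str.slice curr none (some ((min pt.toList.length curr.toList.length : Nat) : Int))).toList
          ++ '\x00' :: (PySem.Str.slice pt (some (-((min pt.toList.length curr.toList.length : Nat) : Int))) none).toList) 1 [0] 0 = 0)
        ↔ ¬ ∃ nn : Nat, 1 ≤ nn ∧ nn ≤ min pt.toList.length curr.toList.length ∧
            pt.toList.drop (pt.toList.length - nn) = curr.toList.take nn := by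
      rcases Nat.eq_zero_or_pos (min pt.toList.length curr.toList.length) with hm0 | hmpos
      · have hsl : (PySem.Str.slice curr none (some ((min pt.toList.length curr.toList.length : Nat) : Int))).toList = [] := by
          rw [PySem.Str.toList_slice, PySem.Chars.slice_eq_listSlice, hm0]
          rw [PySem.List.slice_to _ (by omega)]
          simp
        have hsr : (PySem.Str.slice pt (some (-((min pt.toList.length curr.toList.length : Nat) : Int))) none).toList = pt.toList := by
          rw [PySem.Str.toList_slice, PySem.Chars.slice_eq_listSlice, hm0]
          simp only [Nat.cast_zero, neg_zero]
          rw [PySem.List.slice_zero_start, PySem.List.slice_none_none]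
        rw [hsl, hsr]
        simp only [List.nil_append]
        constructor
        · intro _ h
          obtain ⟨nn, h1, h2, _⟩ := h
          omega
        · intro _
          by_contra hk
          obtain ⟨n, hn1, hb⟩ := (kmp_exists ('\x00' :: pt.toList) (by simp)).1 hk
          have hl : ('\x00' :: pt.toList).length = pt.toList.length + 1 := by simp
          rw [hl] at hb
          exact no_border_cons_nul pt.toList hptnul n hn1 hb
      · have hsl : (PySem.Str.slice curr none (some ((min pt.toList.length curr.toList.length : Nat) : Int))).toList
            = curr.toList.take (min pt.toList.length curr.toList.length) := by
          rw [PySem.Str.toList_slice, PySem.Chars.slice_eq_listSlice]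
          rw [PySem.List.slice_to _ (by omega), Int.toNat_natCast]
        have hsr : (PySem.Str.slice pt (some (-((min pt.toList.length curr.toList.length : Nat) : Int))) none).toList
            = pt.toList.drop (pt.toList.length - min pt.toList.length curr.toList.length) := by
          rw [PySem.Str.toList_slice, PySem.Chars.slice_eq_listSlice]
          rw [PySem.List.slice_from_neg_natCast _ _ (by omega)]
        rw [hsl, hsr]
        have hslen : (curr.toList.take (min pt.toList.length curr.toList.length)
            ++ '\x00' :: pt.toList.drop (pt.toList.length - min pt.toList.length curr.toList.length)).length
            = 2 * min pt.toList.length curr.toList.length + 1 := by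
          rw [List.length_append, List.length_cons, List.length_take, List.length_drop]
          omega
        have hbr := sep_bridge curr.toList pt.toList (min pt.toList.length curr.toList.length)
          (Nat.min_comm _ _) hptnul
        constructor
        · intro hk h
          obtain ⟨nn, h1, h2, heq⟩ := h
          have hex : ∃ n, 1 ≤ n ∧ Brd (curr.toList.take (min pt.toList.length curr.toList.length)
              ++ '\x00' :: pt.toList.drop (pt.toList.length - min pt.toList.length curr.toList.length))
              (2 * min pt.toList.length curr.toList.length + 1) n := by
            refine ⟨nn, h1, ?_⟩
            rw [hbr nn h1]
            exact ⟨h2, heq.symm⟩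
          rw [← hslen] at hex
          exact ((kmp_exists _ (by rw [hslen]; omega)).2 hex) hk
        · intro hnex
          by_contra hk
          obtain ⟨n, hn1, hb⟩ := (kmp_exists _ (by rw [hslen]; omega)).1 hk
          rw [hslen] at hb
          rw [hbr n hn1] at hb
          exact hnex ⟨n, hn1, hb.1, hb.2.symm⟩
    by_cases hex : ∃ nn : Nat, 1 ≤ nn ∧ nn ≤ min pt.toList.length curr.toList.length ∧
        pt.toList.drop (pt.toList.length - nn) = curr.toList.take nn
    · rw [if_pos (hany.2 hex), if_neg (by rw [hkmp]; exact fun h => h hex)]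
    · rw [if_neg (by rw [hany]; exact hex), if_pos (hkmp.2 hex)]

theorem noNul_strip_slice (x : String) (a? b? : Option Int) (h : '\x00' ∉ x.toList) :
    '\x00' ∉ (PySem.Str.strip (PySem.Str.slice x a? b?)).toList := by
  intro hmem
  rw [PySem.Str.toList_strip, PySem.Str.toList_slice, PySem.Chars.slice_eq_listSlice] at hmem
  exact h (PySem.List.mem_of_mem_slice _ _ _ (mem_strip hmem))

theorem noNul_merge (p c : String) (hp : '\x00' ∉ p.toList) (hc : '\x00' ∉ c.toList) :
    '\x00' ∉ (PySem.Str.strip (p ++ "\n" ++ c)).toList := by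
  intro hmem
  rw [PySem.Str.toList_strip] at hmem
  have := mem_strip hmem
  rw [String.toList_append, String.toList_append] at this
  rcases List.mem_append.1 this with h | h
  · rcases List.mem_append.1 h with h2 | h2
    · exact hp h2
    · simp at h2
  · exact hc h

set_option maxHeartbeats 1000000 in

set_option maxHeartbeats 1000000 in
theorem bStep_pres (overlap : Int) (ensured : List String) (curr : String) (hne : ensured ≠ [])
    (hens : ∀ x ∈ ensured, '\x00' ∉ x.toList) (hcur : '\x00' ∉ curr.toList) :
    ∀ x ∈ bStep overlap ensured curr, '\x00' ∉ x.toList := by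
  intro x hx
  unfold bStep at hx
  simp only [List.mem_append, List.mem_singleton] at hx
  rcases hx with h | h
  · exact hens x h
  · subst h
    by_cases h0 : PySem.Str.strip (PySem.Str.slice (PySem.List.pyGetD ensured (-1) "") (some (-overlap)) none) = ""
    · simpa [h0] using hcur
    · simp only [if_neg h0]
      split
      · apply noNul_merge
        · exact noNul_strip_slice _ _ _ (hens _ (by
            rw [PySem.List.pyGetD_neg_one ensured "" hne]; exact List.getLast_mem hne))
        · exact hcur
      · exact hcur

theorem bStep_ne_nil (overlap : Int) (ensured : List String) (curr : String) :
    bStep overlap ensured curr ≠ [] := by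
  unfold bStep
  simp

theorem fold_eq (overlap : Int) (hov : 1 ≤ overlap) :
    ∀ (rest ensured : List String), ensured ≠ [] →
      (∀ x ∈ ensured, '\x00' ∉ x.toList) → (∀ x ∈ rest, '\x00' ∉ x.toList) →
      rest.foldl (aStep overlap) ensured = rest.foldl (bStep overlap) ensured := by
  intro rest
  induction rest with
  | nil => intro _ _ _ _; simp
  | cons c cs IH =>
    intro ensured hne hens hrest
    simp only [List.foldl_cons]
    rw [step_eq overlap hov ensured c hne hens (hrest c (by simp))]
    exact IH (bStep overlap ensured c) (bStep_ne_nil overlap ensured c)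
      (bStep_pres overlap ensured c hne hens (hrest c (by simp)))
      (fun x hx => hrest x (by simp [hx]))

theorem ports_eq (chunks : List String) (overlap : Int)
    (hdom : Dom_ensure_overlap_py chunks overlap) :
    ensure_overlap_py chunks overlap = ensure_overlap_py_alt chunks overlap := by
  unfold ensure_overlap_py ensure_overlap_py_alt
  by_cases hcond : overlap ≤ 0 ∨ PySem.List.len chunks ≤ 1
  · rw [if_pos hcond, if_pos hcond]
  · rw [if_neg hcond, if_neg hcond]
    push Not at hcond
    have hov : 1 ≤ overlap := by omega
    have hlen : 2 ≤ chunks.length := by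
      have := hcond.2
      simp only [PySem.List.len] at this
      omega
    have hnul : ∀ x ∈ chunks, '\x00' ∉ x.toList := by
      intro x hx hmem
      unfold Dom_ensure_overlap_py at hdom
      rw [Bool.and_eq_true, List.all_eq_true] at hdom
      have := hdom.1 x hx
      unfold pvDomStr at this
      rw [List.all_eq_true] at this
      have := this _ hmem
      unfold pvDomChar at this
      simp at this
    rw [PySem.List.foldl_pyRange_pyGetD chunks "" (aStep overlap) _ (by norm_num)]
    rw [PySem.List.slice_from_one, ← List.drop_one]
    have h0mem : PySem.List.pyGetD chunks 0 "" ∈ chunks := by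
      cases chunks with
      | nil => simp at hlen
      | cons c cs => simp [PySem.List.pyGetD_zero_cons]
    refine fold_eq overlap hov _ _ (by simp) ?_ ?_
    · intro x hx
      rw [List.mem_singleton] at hx
      subst hx
      exact hnul _ h0mem
    · intro x hx
      exact hnul x (List.mem_of_mem_drop hx)

-- ===== VERDICT (by name: the statement is the Claim_ definition above) =====
theorem ensure_overlap_py_spec : Claim_equal_ensure_overlap_py := by
  intro chunks overlap hdom
  unfold Spec_ensure_overlap_py
  exact ports_eq chunks overlap hdom
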